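-- pv_equiv track=rewrite | github.com/russellmoss/salesforce-rag-bot | src/pipeline/build_schema_library_end_to_end_original.py | create_role_markdown_summary
-- ===== SOURCE A (Python) =====
-- from typing import List, Dict, Any, Optional, Tuple, Set
--
-- def create_role_markdown_summary(roles: List[dict]) -> str:
--     """Create a markdown summary of roles with hierarchy."""
--     if not roles:
--         return "# Roles\n\nNo roles found."
--
--     markdown = "# Roles\n\n"
--     markdown += f"Total roles: {len(roles)}\n\n"
--
--     # Build hierarchy
--     role_dict = {role.get('Id'): role for role in roles}
--     parent_children = {}
--
--     for role in roles:
--         parent_id = role.get('ParentRoleId')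
--         if parent_id and parent_id in role_dict:
--             if parent_id not in parent_children:
--                 parent_children[parent_id] = []
--             parent_children[parent_id].append(role.get('Id'))
--
--     # Find root roles (no parent)
--     root_roles = [role for role in roles if not role.get('ParentRoleId') or role.get('ParentRoleId') not in role_dict]
--
--     def print_role_hierarchy(role_id, level=0):
--         role = role_dict.get(role_id)
--         if not role:
--             return ""
--
--         indent = "  " * level
--         name = role.get('Name', 'Unknown')
--         dev_name = role.get('DeveloperName', '')
--         rollup_desc = role.get('RollupDescription', '')
--
--         result = f"{indent}- **{name}**"
--         if dev_name and dev_name != name: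
--             result += f" (`{dev_name}`)"
--         result += "\n"
--
--         if rollup_desc:
--             result += f"{indent}  *{rollup_desc}*\n"
--
--         # Add children
--         children = parent_children.get(role_id, [])
--         for child_id in sorted(children, key=lambda x: role_dict.get(x, {}).get('Name', '')):
--             result += print_role_hierarchy(child_id, level + 1)
--
--         return result
--
--     markdown += "## Role Hierarchy\n\n"
--
--     for root_role in sorted(root_roles, key=lambda x: x.get('Name', '')):
--         markdown += print_role_hierarchy(root_role.get('Id'))
--
--     markdown += "\n---\n\n"
--
--     # Add flat list for reference
--     markdown += "## All Roles (Alphabetical)\n\n"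
--
--     for role in sorted(roles, key=lambda x: x.get('Name', '')):
--         name = role.get('Name', 'Unknown')
--         dev_name = role.get('DeveloperName', '')
--         rollup_desc = role.get('RollupDescription', '')
--         parent_id = role.get('ParentRoleId')
--
--         markdown += f"### {name}\n\n"
--
--         if dev_name and dev_name != name:
--             markdown += f"**Developer Name:** `{dev_name}`\n\n"
--
--         if rollup_desc:
--             markdown += f"**Description:** {rollup_desc}\n\n"
--
--         if parent_id and parent_id in role_dict:
--             parent_name = role_dict[parent_id].get('Name', 'Unknown')
--             markdown += f"**Parent Role:** {parent_name}\n\n"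
--
--     return markdown
-- ===== SOURCE B (Python) =====
-- def create_role_markdown_summary(roles):
--     """Create a markdown summary of roles with hierarchy (explicit-stack DFS)."""
--     if not roles:
--         return "# Roles\n\nNo roles found."
--
--     markdown = "# Roles\n\n"
--     markdown += f"Total roles: {len(roles)}\n\n"
--
--     role_dict = {role.get('Id'): role for role in roles}
--     parent_children = {}
--
--     for role in roles:
--         parent_id = role.get('ParentRoleId')
--         if parent_id and parent_id in role_dict:
--             parent_children.setdefault(parent_id, []).append(role.get('Id'))
--
--     root_roles = [role for role in roles if not role.get('ParentRoleId') or role.get('ParentRoleId') not in role_dict]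
--
--     markdown += "## Role Hierarchy\n\n"
--
--     # Depth-first traversal with an explicit stack instead of recursion:
--     # push sorted roots reversed so the alphabetically first root is on top,
--     # emit a node's lines when popped, then push its sorted children reversed.
--     stack = [(r.get('Id'), 0) for r in reversed(sorted(root_roles, key=lambda x: x.get('Name', '')))]
--     while stack:
--         role_id, level = stack.pop()
--         role = role_dict.get(role_id)
--         if not role:
--             continue
--         indent = "  " * level
--         name = role.get('Name', 'Unknown')
--         dev_name = role.get('DeveloperName', '')
--         rollup_desc = role.get('RollupDescription', '')
--         chunk = f"{indent}- **{name}**"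
--         if dev_name and dev_name != name:
--             chunk += f" (`{dev_name}`)"
--         chunk += "\n"
--         if rollup_desc:
--             chunk += f"{indent}  *{rollup_desc}*\n"
--         markdown += chunk
--         children = sorted(parent_children.get(role_id, []), key=lambda x: role_dict.get(x, {}).get('Name', ''))
--         for child_id in reversed(children):
--             stack.append((child_id, level + 1))
--
--     markdown += "\n---\n\n"
--     markdown += "## All Roles (Alphabetical)\n\n"
--
--     for role in sorted(roles, key=lambda x: x.get('Name', '')):
--         name = role.get('Name', 'Unknown')
--         dev_name = role.get('DeveloperName', '')
--         rollup_desc = role.get('RollupDescription', '')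
--         parent_id = role.get('ParentRoleId')
--
--         markdown += f"### {name}\n\n"
--
--         if dev_name and dev_name != name:
--             markdown += f"**Developer Name:** `{dev_name}`\n\n"
--
--         if rollup_desc:
--             markdown += f"**Description:** {rollup_desc}\n\n"
--
--         if parent_id and parent_id in role_dict:
--             parent_name = role_dict[parent_id].get('Name', 'Unknown')
--             markdown += f"**Parent Role:** {parent_name}\n\n"
--
--     return markdown
-- ===== Notes on version B (the rewrite author's own statement) =====
-- stated objective: alternative
-- what changed: The recursive print_role_hierarchy is replaced by an explicit-stack depth-first traversal (pop a (role_id, level), emit its lines, push the sorted children reversed), removing the recursion entirely; dict construction, root detection, sort keys and the flat alphabetical list are kept.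
import Mathlib
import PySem

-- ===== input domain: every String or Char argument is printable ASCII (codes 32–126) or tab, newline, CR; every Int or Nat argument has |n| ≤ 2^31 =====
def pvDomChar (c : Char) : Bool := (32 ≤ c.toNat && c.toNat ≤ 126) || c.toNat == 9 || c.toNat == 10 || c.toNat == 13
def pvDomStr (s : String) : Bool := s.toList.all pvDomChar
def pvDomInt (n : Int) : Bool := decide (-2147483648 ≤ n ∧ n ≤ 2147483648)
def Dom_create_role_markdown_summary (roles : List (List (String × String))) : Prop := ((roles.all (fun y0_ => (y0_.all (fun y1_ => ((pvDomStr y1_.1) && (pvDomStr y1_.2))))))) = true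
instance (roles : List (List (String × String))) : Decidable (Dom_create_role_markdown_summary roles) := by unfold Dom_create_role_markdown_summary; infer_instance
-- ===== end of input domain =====

-- B replaces A's recursive hierarchy printer by an explicit-stack DFS (alternative decomposition,
-- same cost); everything else (dicts, root detection, sort keys, flat list) is kept.

-- ===== PORT A =====
-- shared low-level helpers (both Pythons contain these expressions verbatim)
-- role.get(k): a role arrives as an assoc list but IS a Python dict, so duplicate keys
-- collapse last-wins — Dict.ofList models exactly that.
def pvRGet (r : List (String × String)) (k : String) : Option String :=
  PySem.Dict.get? (PySem.Dict.ofList r) k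

def pvRGetD (r : List (String × String)) (k dflt : String) : String :=
  PySem.Dict.getD (PySem.Dict.ofList r) k dflt

-- Python truthiness of an Optional[str]
def pvTruthy : Option String → Bool
  | none => false
  | some s => s ≠ ""

-- "  " * level
def pvIndent : Nat → String
  | 0 => ""
  | n + 1 => "  " ++ pvIndent n

-- the `- **name**` (+ dev name, + rollup) lines of one hierarchy node
def pvNodeChunk (indent : String) (role : List (String × String)) : String :=
  let name := pvRGetD role "Name" "Unknown"
  let dev := pvRGetD role "DeveloperName" ""
  let roll := pvRGetD role "RollupDescription" ""
  let res := indent ++ "- **" ++ name ++ "**"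
  let res := if dev ≠ "" && dev ≠ name then res ++ " (`" ++ dev ++ "`)" else res
  let res := res ++ "\n"
  if roll ≠ "" then res ++ indent ++ "  *" ++ roll ++ "*\n" else res

-- role_dict = {role.get('Id'): role for role in roles}
def pvRoleDict (roles : List (List (String × String))) :
    PySem.Dict (Option String) (List (String × String)) :=
  roles.foldl (fun d r => d.insert (pvRGet r "Id") r) PySem.Dict.empty

-- the parent_children grouping loop
def pvParentChildren (roles : List (List (String × String)))
    (rd : PySem.Dict (Option String) (List (String × String))) :
    PySem.Dict (Option String) (List (Option String)) :=
  roles.foldl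
    (fun pc r =>
      let pid := pvRGet r "ParentRoleId"
      if pvTruthy pid && rd.contains pid then
        pc.insert pid (pc.getD pid [] ++ [pvRGet r "Id"])
      else pc)
    PySem.Dict.empty

-- sort key of a child id: role_dict.get(x, {}).get('Name', '')
def pvChildKey (rd : PySem.Dict (Option String) (List (String × String)))
    (x : Option String) : String :=
  pvRGetD (rd.getD x []) "Name" ""

-- sort key of a role: x.get('Name', '')
def pvNameKey (r : List (String × String)) : String := pvRGetD r "Name" ""

-- print_role_hierarchy, fuelled only to be total: on every admitted input the
-- recursion depth is < roles.length + 1 (the fuel A's port passes), so fuel never runs out.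
def pvPrintHier (rd : PySem.Dict (Option String) (List (String × String)))
    (pc : PySem.Dict (Option String) (List (Option String))) :
    Nat → Option String → Nat → String
  | 0, _, _ => ""
  | fuel + 1, rid, level =>
    match PySem.Dict.get? rd rid with
    | none => ""
    | some role =>
      if role.isEmpty then ""   -- Python: `if not role: return ""` (None or empty dict)
      else
        let res := pvNodeChunk (pvIndent level) role
        (PySem.List.sorted (pc.getD rid []) (pvChildKey rd) false).foldl
          (fun acc c => acc ++ pvPrintHier rd pc fuel c (level + 1)) res

-- one `### name` block of the alphabetical flat list
def pvFlatSection (rd : PySem.Dict (Option String) (List (String × String)))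
    (r : List (String × String)) : String :=
  let name := pvRGetD r "Name" "Unknown"
  let dev := pvRGetD r "DeveloperName" ""
  let roll := pvRGetD r "RollupDescription" ""
  let pid := pvRGet r "ParentRoleId"
  let s := "### " ++ name ++ "\n\n"
  let s := if dev ≠ "" && dev ≠ name then s ++ "**Developer Name:** `" ++ dev ++ "`\n\n" else s
  let s := if roll ≠ "" then s ++ "**Description:** " ++ roll ++ "\n\n" else s
  if pvTruthy pid && rd.contains pid then
    s ++ "**Parent Role:** " ++ pvRGetD (rd.getD pid []) "Name" "Unknown" ++ "\n\n"
  else s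

def create_role_markdown_summary (roles : List (List (String × String))) : String :=
  if roles.isEmpty then "# Roles\n\nNo roles found."
  else
    let markdown := "# Roles\n\n"
    let markdown := markdown ++ ("Total roles: " ++ PySem.Int.toStr (roles.length : Int) ++ "\n\n")
    let rd := pvRoleDict roles
    let pc := pvParentChildren roles rd
    let rootRoles := roles.filter (fun r =>
      !pvTruthy (pvRGet r "ParentRoleId") || !(rd.contains (pvRGet r "ParentRoleId")))
    let markdown := markdown ++ "## Role Hierarchy\n\n"
    let markdown := (PySem.List.sorted rootRoles pvNameKey false).foldl
      (fun acc r => acc ++ pvPrintHier rd pc (roles.length + 1) (pvRGet r "Id") 0) markdown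
    let markdown := markdown ++ "\n---\n\n"
    let markdown := markdown ++ "## All Roles (Alphabetical)\n\n"
    (PySem.List.sorted roles pvNameKey false).foldl
      (fun acc r => acc ++ pvFlatSection rd r) markdown

-- ===== PORT B =====
-- fuel bookkeeping only (Source B's `while stack` needs no fuel): the number of pops the
-- stack loop performs from one entry, so that the global fuel below is exactly enough.
def pvNeeded (rd : PySem.Dict (Option String) (List (String × String)))
    (pc : PySem.Dict (Option String) (List (Option String))) :
    Nat → Option String → Nat
  | 0, _ => 1
  | fuel + 1, rid =>
    match PySem.Dict.get? rd rid with
    | none => 1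
    | some role =>
      if role.isEmpty then 1
      else
        1 + ((PySem.List.sorted (pc.getD rid []) (pvChildKey rd) false).map
              (fun c => pvNeeded rd pc fuel c)).sum

def pvSumNeeded (rd : PySem.Dict (Option String) (List (String × String)))
    (pc : PySem.Dict (Option String) (List (Option String)))
    (stack : List (Option String × Nat × Nat)) : Nat :=
  (stack.map (fun e => pvNeeded rd pc e.2.2 e.1)).sum

-- Source B's `while stack:` loop. The Lean list's HEAD is the top of the Python stack, so
-- Source B's "push sorted children reversed, pop from the end" is prepending the sorted
-- children in order. Entries carry a per-node depth fuel (totality bookkeeping only).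
def pvHierLoop (rd : PySem.Dict (Option String) (List (String × String)))
    (pc : PySem.Dict (Option String) (List (Option String))) :
    Nat → List (Option String × Nat × Nat) → String → String
  | 0, _, acc => acc
  | _ + 1, [], acc => acc
  | g + 1, (rid, level, f) :: rest, acc =>
    match f, PySem.Dict.get? rd rid with
    | 0, _ => pvHierLoop rd pc g rest acc
    | _ + 1, none => pvHierLoop rd pc g rest acc   -- `if not role: continue`
    | f' + 1, some role =>
      if role.isEmpty then pvHierLoop rd pc g rest acc
      else
        let chunk := pvNodeChunk (pvIndent level) role
        let children := PySem.List.sorted (pc.getD rid []) (pvChildKey rd) false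
        pvHierLoop rd pc g (children.map (fun c => (c, level + 1, f')) ++ rest) (acc ++ chunk)

def create_role_markdown_summary_alt (roles : List (List (String × String))) : String :=
  if roles.isEmpty then "# Roles\n\nNo roles found."
  else
    let markdown := "# Roles\n\n"
    let markdown := markdown ++ ("Total roles: " ++ PySem.Int.toStr (roles.length : Int) ++ "\n\n")
    let rd := pvRoleDict roles
    let pc := pvParentChildren roles rd
    let rootRoles := roles.filter (fun r =>
      !pvTruthy (pvRGet r "ParentRoleId") || !(rd.contains (pvRGet r "ParentRoleId")))
    let markdown := markdown ++ "## Role Hierarchy\n\n"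
    let stack := (PySem.List.sorted rootRoles pvNameKey false).map
      (fun r => (pvRGet r "Id", 0, roles.length + 1))
    let markdown := pvHierLoop rd pc (pvSumNeeded rd pc stack) stack markdown
    let markdown := markdown ++ "\n---\n\n"
    let markdown := markdown ++ "## All Roles (Alphabetical)\n\n"
    (PySem.List.sorted roles pvNameKey false).foldl
      (fun acc r => acc ++ pvFlatSection rd r) markdown

-- ===== PRECONDITION & SPEC =====
def Spec_create_role_markdown_summary (roles : List (List (String × String))) (out : String) : Prop := out = create_role_markdown_summary_alt roles
instance (roles : List (List (String × String))) (out : String) : Decidable (Spec_create_role_markdown_summary roles out) := by unfold Spec_create_role_markdown_summary; infer_instance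

-- ===== CLAIM (what is proved, stated in full; the proofs are below) =====
def Claim_equal_create_role_markdown_summary : Prop := ∀ (roles : List (List (String × String))), Dom_create_role_markdown_summary roles → Spec_create_role_markdown_summary roles (create_role_markdown_summary roles)

-- ===== LEMMAS AND PROOFS =====

-- concatenation of a rendering function over a list
def pvCatMap {α : Type} (f : α → String) : List α → String
  | [] => ""
  | x :: t => f x ++ pvCatMap f t

lemma pvCatMap_append {α : Type} (f : α → String) (l₁ l₂ : List α) :
    pvCatMap f (l₁ ++ l₂) = pvCatMap f l₁ ++ pvCatMap f l₂ := by
  induction l₁ with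
  | nil => simp [pvCatMap]
  | cons x t ih => simp [pvCatMap, ih, String.append_assoc]

lemma pvCatMap_map {α β : Type} (f : β → String) (h : α → β) (l : List α) :
    pvCatMap f (l.map h) = pvCatMap (fun x => f (h x)) l := by
  induction l with
  | nil => rfl
  | cons x t ih => simp [pvCatMap, ih]

lemma pvFoldl_append_catMap {α : Type} (f : α → String) (l : List α) (a : String) :
    l.foldl (fun acc x => acc ++ f x) a = a ++ pvCatMap f l := by
  induction l generalizing a with
  | nil => simp [pvCatMap]
  | cons x t ih => simp [pvCatMap, ih, String.append_assoc]

lemma pvNeeded_pos (rd : PySem.Dict (Option String) (List (String × String)))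
    (pc : PySem.Dict (Option String) (List (Option String)))
    (fuel : Nat) (rid : Option String) : 1 ≤ pvNeeded rd pc fuel rid := by
  cases fuel with
  | zero => simp [pvNeeded]
  | succ f =>
    simp only [pvNeeded]
    cases hget : PySem.Dict.get? rd rid with
    | none => simp
    | some role =>
      by_cases h : role.isEmpty <;> simp [h]

-- the stack loop, run with exactly enough fuel, renders each stack entry in order
-- exactly as A's recursive printer does
lemma pvHierLoop_eq (rd : PySem.Dict (Option String) (List (String × String)))
    (pc : PySem.Dict (Option String) (List (Option String))) :
    ∀ (g : Nat) (stack : List (Option String × Nat × Nat)) (acc : String),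
      g = pvSumNeeded rd pc stack →
      pvHierLoop rd pc g stack acc =
        acc ++ pvCatMap (fun e => pvPrintHier rd pc e.2.2 e.1 e.2.1) stack := by
  intro g
  induction g with
  | zero =>
    intro stack acc hg
    cases stack with
    | nil => simp [pvHierLoop, pvCatMap]
    | cons e rest =>
      exfalso
      obtain ⟨rid, level, f⟩ := e
      have h1 := pvNeeded_pos rd pc f rid
      simp only [pvSumNeeded, List.map_cons, List.sum_cons] at hg
      omega
  | succ g ih =>
    intro stack acc hg
    cases stack with
    | nil => simp [pvHierLoop, pvCatMap]
    | cons e rest =>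
      obtain ⟨rid, level, f⟩ := e
      simp only [pvSumNeeded, List.map_cons, List.sum_cons] at hg
      cases f with
      | zero =>
        simp only [pvNeeded] at hg
        have hrest : g = pvSumNeeded rd pc rest := by simp only [pvSumNeeded]; omega
        simp only [pvHierLoop, pvCatMap, pvPrintHier, ih rest acc hrest]
        simp [String.empty_append]
      | succ f' =>
        simp only [pvNeeded] at hg
        simp only [pvHierLoop, pvCatMap, pvPrintHier]
        cases hget : PySem.Dict.get? rd rid with
        | none =>
          simp only [hget] at hg ⊢
          have hrest : g = pvSumNeeded rd pc rest := by simp only [pvSumNeeded]; omega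
          rw [ih rest acc hrest]
          simp [String.empty_append]
        | some role =>
          simp only [hget] at hg ⊢
          by_cases hemp : role.isEmpty
          · simp only [hemp, if_true] at hg ⊢
            have hrest : g = pvSumNeeded rd pc rest := by simp only [pvSumNeeded]; omega
            rw [ih rest acc hrest]
            simp [String.empty_append]
          · simp only [hemp, if_false, Bool.false_eq_true] at hg ⊢
            set children := PySem.List.sorted (pc.getD rid []) (pvChildKey rd) false with hch
            have hnew : g = pvSumNeeded rd pc
                (children.map (fun c => (c, level + 1, f')) ++ rest) := by
              simp only [pvSumNeeded, List.map_append, List.sum_append, List.map_map,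
                Function.comp_def]
              omega
            rw [ih _ _ hnew]
            rw [pvCatMap_append, pvCatMap_map]
            rw [pvFoldl_append_catMap]
            simp [String.append_assoc]

-- A's per-root fold and B's stack loop over the same sorted roots agree
lemma pvHier_agree (rd : PySem.Dict (Option String) (List (String × String)))
    (pc : PySem.Dict (Option String) (List (Option String)))
    (n : Nat) (roots : List (List (String × String))) (md : String) :
    pvHierLoop rd pc
        (pvSumNeeded rd pc (roots.map (fun r => (pvRGet r "Id", 0, n + 1))))
        (roots.map (fun r => (pvRGet r "Id", 0, n + 1))) md
      = roots.foldl (fun acc r => acc ++ pvPrintHier rd pc (n + 1) (pvRGet r "Id") 0) md := by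
  rw [pvHierLoop_eq rd pc _ _ md rfl, pvCatMap_map, pvFoldl_append_catMap]

-- ===== VERDICT (by name: the statement is the Claim_ definition above) =====
theorem create_role_markdown_summary_spec : Claim_equal_create_role_markdown_summary := by
  intro roles _
  unfold Spec_create_role_markdown_summary
  unfold create_role_markdown_summary create_role_markdown_summary_alt
  by_cases h : roles.isEmpty
  · simp [h]
  · simp only [h, if_false, Bool.false_eq_true]
    rw [pvHier_agree]
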